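-- pv_equiv track=rewrite | github.com/YuriSpiridonov/CodeWars | next-smaller-number-with-the-same-digits.py | next_smaller
-- ===== SOURCE A (Python) =====
-- def next_smaller(n):
--     lst = list(str(n))
--     templst1half = list()
--     templst2half = list()
--     for i in range(len(lst)):
--         lst[i] = int(lst[i])
--     for index in range(1,len(lst)+1):
--         try:
--             if lst[-index] < lst[-(index+1)]:
--                 templst1half = lst[:-(index+1)]
--                 templst2half = lst[-(index+1):]
--                 templst1half.append(templst2half.pop(templst2half.index(max(i for i in templst2half if i < templst2half[0]))))
--                 templst1half.extend(sorted(templst2half, reverse = True))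
--                 for i in range(len(templst1half)):
--                     if templst1half[0] != 0:
--                         templst1half[i] = str(templst1half[i])
--                 return int(''.join(templst1half))
--         except:
--             return -1
-- ===== SOURCE B (Python) =====
-- import itertools
--
-- def next_smaller(n):
--     digits = [int(c) for c in str(n)]
--     best = -1
--     for p in itertools.permutations(digits):
--         if p[0] == 0 and len(p) > 1:
--             continue
--         v = 0
--         for d in p:
--             v = v * 10 + d
--         if v < n and v > best:
--             best = v
--     return best
-- ===== Notes on version B (the rewrite author's own statement) =====
-- stated objective: alternative
-- what changed: Replaced the single-pass pivot/suffix greedy (rightmost descent, swap in the largest smaller suffix digit, sort the rest descending, with try/except control flow) by brute-force enumeration: generate every permutation of the digits, keep those without a leading zero whose value is below n, and return the maximum (or -1); this trades the greedy construction for exhaustive search + max-selection.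
import Mathlib
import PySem

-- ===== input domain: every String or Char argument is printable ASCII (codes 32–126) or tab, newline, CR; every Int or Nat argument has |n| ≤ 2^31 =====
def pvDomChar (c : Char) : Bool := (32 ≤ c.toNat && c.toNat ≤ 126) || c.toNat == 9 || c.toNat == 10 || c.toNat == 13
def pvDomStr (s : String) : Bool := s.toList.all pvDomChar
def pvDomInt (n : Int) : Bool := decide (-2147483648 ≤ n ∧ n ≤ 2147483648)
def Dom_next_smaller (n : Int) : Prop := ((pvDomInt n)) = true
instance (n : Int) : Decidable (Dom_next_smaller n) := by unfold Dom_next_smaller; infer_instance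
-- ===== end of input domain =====

-- B replaces A's pivot/suffix greedy by exhaustive permutation enumeration with max-selection
-- (alternative algorithm, not faster); equal return value proved for every n ≥ 0.


-- ===== PORT A =====
-- int(c) on a one-character string (the getD default is never reached when the char is a digit,
-- i.e. whenever n ≥ 0; for n < 0 Python raises ValueError — excluded by Pre_).
def pvConvA (c : Char) : Int := (PySem.Int.ofChars? [c]).getD 0

-- lst = list(str(n)); for i in range(len(lst)): lst[i] = int(lst[i])
def pvDigitsA (n : Int) : List Int := (PySem.Int.toChars n).map pvConvA

-- the body of the if inside the try (one iteration that returns)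
def pvBodyA (lst : List Int) (index : Nat) : Int :=
  let t1 := PySem.List.slice lst none (some (-((index : Int) + 1)))  -- lst[:-(index+1)]
  let t2 := PySem.List.slice lst (some (-((index : Int) + 1))) none  -- lst[-(index+1):]
  (PySem.List.pyGet? t2 0).elim (-1) (fun pivot =>                   -- IndexError → except → -1
    (PySem.List.max? (t2.filter (fun i => decide (i < pivot))) (fun x => x)).elim (-1) (fun b =>
      -- max() of an empty generator raises ValueError, caught → -1
      (PySem.List.index? t2 b).elim (-1) (fun j =>                   -- ValueError, caught (unreachable)
        (PySem.List.pop? t2 (j : Int)).elim (-1) (fun bt =>          -- IndexError, caught (unreachable)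
          let full := (t1 ++ [bt.1]) ++ PySem.List.sorted bt.2 (fun x => x) true
          if PySem.List.pyGet? full 0 = some 0 then -1
            -- head 0: the loop converts nothing, ''.join on ints raises TypeError, caught → -1
          else full.foldl (fun a d => a * 10 + d) 0))))
            -- int(''.join(strs)) where every element is str(d) for a single digit d (0 ≤ d ≤ 9):
            -- on that domain int() of the joined digit run is exactly this base-10 fold (exact)

-- for index in range(1, len(lst)+1): try: if lst[-index] < lst[-(index+1)]: … except: return -1
def pvLoopA (lst : List Int) (index : Nat) : Int :=
  if index < lst.length + 1 then
    (PySem.List.pyGet? lst (-(index : Int))).elim (-1) (fun x =>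
      (PySem.List.pyGet? lst (-((index : Int) + 1))).elim (-1) (fun y =>
        if x < y then pvBodyA lst index else pvLoopA lst (index + 1)))
    -- an IndexError inside the try lands in the except → -1
  else -1
    -- loop exhausted without returning (Python would return None); unreachable: for a nonempty
    -- digit list the index = len iteration always raises IndexError first
termination_by lst.length + 1 - index

def next_smaller (n : Int) : Int := pvLoopA (pvDigitsA n) 1

-- ===== PORT B =====
def next_smaller_alt (n : Int) : Int :=
  let ds := (PySem.Int.toChars n).map (fun c => (PySem.Int.ofChars? [c]).getD 0)
  (PySem.List.permutations ds ds.length).foldl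
    (fun best p =>
      if PySem.List.pyGet? p 0 = some 0 ∧ 1 < PySem.List.len p then best   -- continue
      else
        let v := p.foldl (fun v d => v * 10 + d) 0
        if v < n ∧ best < v then v else best)
    (-1)

-- ===== PRECONDITION & SPEC =====
-- Pre_ excludes exactly the negative inputs, on which A (and B alike) raises ValueError from int('-').
def Pre_next_smaller (n : Int) : Prop := 0 ≤ n
instance (n : Int) : Decidable (Pre_next_smaller n) := by unfold Pre_next_smaller; infer_instance
def pvWitness_next_smaller : Int := 21

def Spec_next_smaller (n : Int) (out : Int) : Prop := out = next_smaller_alt n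
instance (n : Int) (out : Int) : Decidable (Spec_next_smaller n out) := by unfold Spec_next_smaller; infer_instance

-- ===== CLAIM (what is proved, stated in full; the proofs are below) =====
def Claim_equal_next_smaller : Prop := ∀ (n : Int), Dom_next_smaller n → Pre_next_smaller n → Spec_next_smaller n (next_smaller n)

-- ===== LEMMAS AND PROOFS =====

-- base-10 value of a digit list (the very fold both ports use)
def dval (l : List Int) : Int := l.foldl (fun a d => a * 10 + d) 0

-- every entry is a decimal digit
def AllDig (l : List Int) : Prop := ∀ x ∈ l, 0 ≤ x ∧ x ≤ 9

-- strict lexicographic order on equal-length digit lists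
def lexLt : List Int → List Int → Prop
  | _, [] => False
  | [], _ :: _ => True
  | a :: p, b :: q => a < b ∨ (a = b ∧ lexLt p q)

theorem dval_foldl (l : List Int) (a : Int) :
    l.foldl (fun a d => a * 10 + d) a = a * 10 ^ l.length + dval l := by
  induction l generalizing a with
  | nil => simp [dval]
  | cons x t ih =>
    have h1 : dval (x :: t) = x * 10 ^ t.length + dval t := by
      simp only [dval, List.foldl_cons]
      rw [ih]; simp [dval]
    simp only [List.foldl_cons, List.length_cons]
    rw [ih, h1]; ring
theorem dval_cons (x : Int) (l : List Int) :
    dval (x :: l) = x * 10 ^ l.length + dval l := by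
  simp only [dval, List.foldl_cons]
  rw [dval_foldl]; simp [dval]
theorem dval_append_singleton (l : List Int) (x : Int) :
    dval (l ++ [x]) = 10 * dval l + x := by
  simp only [dval, List.foldl_append, List.foldl_cons, List.foldl_nil]
  ring

theorem dval_bounds {l : List Int} (h : AllDig l) :
    0 ≤ dval l ∧ dval l < 10 ^ l.length := by
  induction l with
  | nil => simp [dval]
  | cons x t ih =>
    obtain ⟨hx0, hx9⟩ := h x (by simp)
    obtain ⟨h0, h1⟩ := ih (fun y hy => h y (by simp [hy]))
    rw [dval_cons]
    have hp : (0:Int) < 10 ^ t.length := by positivity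
    constructor
    · nlinarith
    · simp only [List.length_cons, pow_succ]
      nlinarith
theorem lex_dval_lt : ∀ {p q : List Int}, AllDig p → AllDig q → p.length = q.length →
    lexLt p q → dval p < dval q := by
  intro p
  induction p with
  | nil => intro q _ _ _ h; cases q with
    | nil => simp [lexLt] at h
    | cons b q' => simp at *
  | cons a p' ih =>
    intro q hp hq hl h
    cases q with
    | nil => simp [lexLt] at h
    | cons b q' =>
      simp only [List.length_cons, Nat.add_right_cancel_iff] at hl
      obtain ⟨ha0, ha9⟩ := hp a (by simp)
      obtain ⟨hb0, hb9⟩ := hq b (by simp)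
      have hp' : AllDig p' := fun y hy => hp y (by simp [hy])
      have hq' : AllDig q' := fun y hy => hq y (by simp [hy])
      obtain ⟨hpl, hpu⟩ := dval_bounds hp'
      obtain ⟨hql, hqu⟩ := dval_bounds hq'
      rw [dval_cons, dval_cons, hl]
      rcases h with hab | ⟨hab, hrec⟩
      · have hpow : (0:Int) < 10 ^ q'.length := by positivity
        rw [hl] at hpu
        nlinarith
      · subst hab
        have := ih hp' hq' hl hrec
        omega
theorem lex_trichotomy : ∀ (p q : List Int), p.length = q.length →
    lexLt p q ∨ p = q ∨ lexLt q p := by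
  intro p
  induction p with
  | nil => intro q h; cases q with
    | nil => right; left; rfl
    | cons b q' => simp at h
  | cons a p' ih =>
    intro q h
    cases q with
    | nil => simp at h
    | cons b q' =>
      simp only [List.length_cons, Nat.add_right_cancel_iff] at h
      rcases lt_trichotomy a b with hab | hab | hab
      · left; exact Or.inl hab
      · subst hab
        rcases ih q' h with h1 | h1 | h1
        · left; exact Or.inr ⟨rfl, h1⟩
        · right; left; rw [h1]
        · right; right; exact Or.inr ⟨rfl, h1⟩
      · right; right; exact Or.inl hab
theorem dval_lt_lex {p q : List Int} (hp : AllDig p) (hq : AllDig q)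
    (hl : p.length = q.length) (h : dval p < dval q) : lexLt p q := by
  rcases lex_trichotomy p q hl with h1 | h1 | h1
  · exact h1
  · subst h1; exact absurd h (lt_irrefl _)
  · exact absurd (lex_dval_lt hq hp hl.symm h1) (by omega)
theorem lex_min : ∀ (s p : List Int), s.Pairwise (· ≤ ·) → p.Perm s → ¬ lexLt p s := by
  intro s
  induction s with
  | nil => intro p _ hperm; rw [List.perm_nil.mp hperm]; simp [lexLt]
  | cons c s' ih =>
    intro p hpair hperm hlex
    cases p with
    | nil => exact absurd hperm.symm (by simp [List.perm_nil])
    | cons h p' =>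
      obtain ⟨hc, hs'⟩ := List.pairwise_cons.mp hpair
      rcases hlex with hlt | ⟨heq, hrec⟩
      · have hmem : h ∈ c :: s' := hperm.subset (by simp)
        rcases List.mem_cons.mp hmem with rfl | hmem'
        · exact absurd hlt (lt_irrefl _)
        · exact absurd hlt (by have := hc h hmem'; omega)
      · subst heq
        exact ih p' hs' hperm.cons_inv hrec
theorem lex_max : ∀ (m p : List Int), m.Pairwise (fun x y => y ≤ x) → p.Perm m → ¬ lexLt m p := by
  intro m
  induction m with
  | nil => intro p _ hperm; rw [List.perm_nil.mp hperm]; simp [lexLt]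
  | cons c m' ih =>
    intro p hpair hperm hlex
    cases p with
    | nil => simp [lexLt] at hlex
    | cons h p' =>
      obtain ⟨hc, hm'⟩ := List.pairwise_cons.mp hpair
      rcases hlex with hlt | ⟨heq, hrec⟩
      · have hmem : h ∈ c :: m' := hperm.subset (by simp)
        rcases List.mem_cons.mp hmem with rfl | hmem'
        · exact absurd hlt (lt_irrefl _)
        · exact absurd hlt (by have := hc h hmem'; omega)
      · subst heq
        exact ih p' hm' hperm.cons_inv hrec
theorem lex_append_left : ∀ (x p q : List Int), lexLt (x ++ p) (x ++ q) ↔ lexLt p q := by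
  intro x p q
  induction x with
  | nil => exact Iff.rfl
  | cons e x' ih =>
    show e < e ∨ (e = e ∧ lexLt (x' ++ p) (x' ++ q)) ↔ lexLt p q
    simp [ih]
theorem mem_permutations_of_perm : ∀ (p xs : List Int), p.Perm xs →
    p ∈ PySem.List.permutations xs xs.length := by
  intro p
  induction p with
  | nil =>
    intro xs h
    rw [List.perm_nil.mp h.symm]
    simp [PySem.List.permutations_zero]
  | cons x p' ih =>
    intro xs h
    have hlen : xs.length = p'.length + 1 := by
      have := h.length_eq; simpa using this.symm
    rw [hlen, PySem.List.permutations_succ, List.mem_flatMap]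
    have hx : x ∈ xs := h.subset (by simp)
    refine ⟨xs.idxOf x, by simp [List.mem_range]; exact List.idxOf_lt_length_of_mem hx, ?_⟩
    rw [List.getElem?_idxOf hx]
    have hperm' : p'.Perm (xs.eraseIdx (xs.idxOf x)) := by
      have h1 : (x :: xs.eraseIdx (xs.idxOf x)).Perm xs :=
        PySem.List.perm_cons_eraseIdx xs (List.getElem?_idxOf hx)
      exact (h.trans h1.symm).cons_inv
    have hlen' : (xs.eraseIdx (xs.idxOf x)).length = p'.length := by
      rw [List.length_eraseIdx_of_lt (List.idxOf_lt_length_of_mem hx), hlen]; omega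
    have := ih _ hperm'
    rw [hlen'] at this
    simp only [List.mem_map]
    exact ⟨p', this, rfl⟩
def rList (pre : List Int) (a b c : Int) (suf : List Int) : List Int :=
  pre ++ b :: PySem.List.sorted (a :: (c :: suf).erase b) (fun x => x) true

-- A's construction is maximal: every smaller permutation is ≤ r
theorem r_maximal (pre : List Int) (a b c : Int) (suf : List Int)
    (hs : (c :: suf).Pairwise (· ≤ ·)) (hca : c < a)
    (hbmem : b ∈ (c :: suf).filter (fun y => decide (y < a)))
    (hbmax : ∀ y ∈ (c :: suf).filter (fun y => decide (y < a)), y ≤ b) :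
    ∀ p, p.Perm (pre ++ a :: c :: suf) → lexLt p (pre ++ a :: c :: suf) →
      p = rList pre a b c suf ∨ lexLt p (rList pre a b c suf) := by
  have hba : b < a := by simpa using (List.mem_filter.mp hbmem).2
  have hbm : b ∈ c :: suf := (List.mem_filter.mp hbmem).1
  induction pre with
  | nil =>
    intro p hperm hlex
    simp only [List.nil_append, rList] at *
    set rtl := PySem.List.sorted (a :: (c :: suf).erase b) (fun x => x) true with hrtl
    cases p with
    | nil => exact absurd (List.perm_nil.mp hperm.symm) (by simp)
    | cons h p' =>
      simp only [lexLt] at hlex ⊢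
      rcases hlex with hlt | ⟨heq, hrec⟩
      · have hmem : h ∈ a :: c :: suf := hperm.subset (by simp)
        have hmem' : h ∈ c :: suf := by
          rcases List.mem_cons.mp hmem with rfl | hm
          · exact absurd hlt (lt_irrefl _)
          · exact hm
        have hfil : h ∈ (c :: suf).filter (fun y => decide (y < a)) :=
          List.mem_filter.mpr ⟨hmem', by simp [hlt]⟩
        rcases lt_or_eq_of_le (hbmax h hfil) with hhb | heq
        · right; exact Or.inl hhb
        · have hperm' : p'.Perm (a :: (c :: suf).erase b) := by
            have h2 := (List.cons_perm_iff_perm_erase.mp hperm).2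
            rwa [heq, List.erase_cons_tail (by simp; omega)] at h2
          have hpr : p'.Perm rtl := hperm'.trans (PySem.List.sorted_perm _ _ _).symm
          rcases lex_trichotomy p' rtl hpr.length_eq with h1 | h1 | h1
          · right; exact Or.inr ⟨heq, h1⟩
          · left; rw [heq, h1]
          · exact absurd h1 (lex_max rtl p' (PySem.List.sorted_pairwise_rev _ _) hpr)
      · subst heq
        exact absurd hrec (lex_min (c :: suf) p' hs hperm.cons_inv)
  | cons e pre' ih =>
    intro p hperm hlex
    simp only [List.cons_append, rList] at hperm hlex ⊢
    cases p with
    | nil => exact absurd (List.perm_nil.mp hperm.symm) (by simp)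
    | cons h p' =>
      simp only [lexLt] at hlex ⊢
      rcases hlex with hlt | ⟨heq, hrec⟩
      · right; exact Or.inl hlt
      · subst heq
        rcases ih p' hperm.cons_inv hrec with h1 | h1
        · left; simp only [rList] at h1; rw [h1]
        · right; refine Or.inr ⟨rfl, ?_⟩; simpa [rList] using h1

theorem r_perm (pre : List Int) (a b c : Int) (suf : List Int)
    (hbmem : b ∈ (c :: suf).filter (fun y => decide (y < a))) :
    (rList pre a b c suf).Perm (pre ++ a :: c :: suf) := by
  have hbm : b ∈ c :: suf := (List.mem_filter.mp hbmem).1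
  unfold rList
  refine List.Perm.append_left pre ?_
  have h1 : (PySem.List.sorted (a :: (c :: suf).erase b) (fun x => x) true).Perm
      (a :: (c :: suf).erase b) := PySem.List.sorted_perm _ _ _
  have h2 : (b :: a :: (c :: suf).erase b).Perm (a :: c :: suf) := by
    have h3 := (List.perm_cons_erase hbm).cons a
    exact (List.Perm.swap a b _).trans h3.symm
  exact (h1.cons b).trans h2

theorem r_lex (pre : List Int) (a b c : Int) (suf : List Int)
    (hba : b < a) :
    lexLt (rList pre a b c suf) (pre ++ a :: c :: suf) := by
  unfold rList
  exact (lex_append_left pre _ _).mpr (Or.inl hba)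

-- what the loop of A computes
theorem loop_eq : ∀ (d : List Int) (index : Nat), 1 ≤ index → index ≤ d.length →
    (d.drop (d.length - index)).Pairwise (· ≤ ·) →
    (d.Pairwise (· ≤ ·) ∧ pvLoopA d index = -1) ∨
    (∃ i a c suf, index ≤ d.length - 1 - i ∧ i + 1 < d.length ∧ d.drop i = a :: c :: suf ∧ c < a ∧
      (c :: suf).Pairwise (· ≤ ·) ∧ pvLoopA d index = pvBodyA d (d.length - 1 - i)) := by
  intro d
  suffices H : ∀ (k index : Nat), d.length - index = k → 1 ≤ index → index ≤ d.length →
      (d.drop (d.length - index)).Pairwise (· ≤ ·) →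
      (d.Pairwise (· ≤ ·) ∧ pvLoopA d index = -1) ∨
      (∃ i a c suf, index ≤ d.length - 1 - i ∧ i + 1 < d.length ∧ d.drop i = a :: c :: suf ∧ c < a ∧
        (c :: suf).Pairwise (· ≤ ·) ∧ pvLoopA d index = pvBodyA d (d.length - 1 - i)) by
    intro index h1 h2 hs
    exact H (d.length - index) index rfl h1 h2 hs
  intro k
  induction k with
  | zero =>
    intro index hk h1 h2 hs
    have hIL : index = d.length := by omega
    left
    have hsome : PySem.List.pyGet? d (-(index : Int)) = some d[0] := by
      rw [PySem.List.pyGet?_neg_natCast d index (by omega) (by omega)]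
      rw [show d.length - index = 0 by omega]
      exact List.getElem?_eq_getElem (by omega)
    have hnone : PySem.List.pyGet? d (-((index : Int) + 1)) = none := by
      rw [PySem.List.pyGet?_eq_none_iff, PySem.Raise.InRange]
      omega
    have hstep : pvLoopA d index = -1 := by
      rw [pvLoopA, if_pos (by omega), hsome, hnone]
      simp
    refine ⟨?_, hstep⟩
    rw [hIL] at hs
    simpa using hs
  | succ k ih =>
    intro index hk h1 h2 hs
    have hlt : index < d.length := by omega
    have hx : PySem.List.pyGet? d (-(index : Int)) = some d[d.length - index] := by
      rw [PySem.List.pyGet?_neg_natCast d index (by omega) (by omega)]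
      exact List.getElem?_eq_getElem (by omega)
    have hcast : -((index : Int) + 1) = -(((index + 1 : Nat)) : Int) := by push_cast; ring
    have hy : PySem.List.pyGet? d (-((index : Int) + 1)) = some d[d.length - (index + 1)] := by
      rw [hcast, PySem.List.pyGet?_neg_natCast d (index + 1) (by omega) (by omega)]
      exact List.getElem?_eq_getElem (by omega)
    have hstep : pvLoopA d index =
        if d[d.length - index] < d[d.length - (index + 1)] then pvBodyA d index
        else pvLoopA d (index + 1) := by
      rw [pvLoopA, if_pos (by omega), hx, hy]
      simp [Option.elim_some]
    have hdrop1 : d.drop (d.length - (index + 1)) =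
        d[d.length - (index + 1)] :: d.drop (d.length - index) := by
      rw [List.drop_eq_getElem_cons (by omega),
        show d.length - (index + 1) + 1 = d.length - index by omega]
    by_cases hcond : d[d.length - index] < d[d.length - (index + 1)]
    · rw [if_pos hcond] at hstep
      right
      have hdrop2 : d.drop (d.length - index) =
          d[d.length - index] :: d.drop (d.length - index + 1) :=
        List.drop_eq_getElem_cons (by omega)
      refine ⟨d.length - (index + 1), d[d.length - (index + 1)], d[d.length - index],
        d.drop (d.length - index + 1), by omega, by omega, ?_, hcond, ?_, ?_⟩
      · rw [hdrop1, hdrop2]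
      · rw [← hdrop2]
        exact hs
      · rw [show d.length - 1 - (d.length - (index + 1)) = index by omega]
        exact hstep
    · rw [if_neg hcond] at hstep
      have hs' : (d.drop (d.length - (index + 1))).Pairwise (· ≤ ·) := by
        rw [hdrop1]
        refine List.pairwise_cons.mpr ⟨?_, hs⟩
        intro z hz
        have hdrop2 : d.drop (d.length - index) =
            d[d.length - index] :: d.drop (d.length - index + 1) :=
          List.drop_eq_getElem_cons (by omega)
        rw [hdrop2] at hz hs
        obtain ⟨hhead, _⟩ := List.pairwise_cons.mp hs
        rcases List.mem_cons.mp hz with rfl | hz'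
        · omega
        · have := hhead z hz'
          omega
      rcases ih (index + 1) (by omega) (by omega) (by omega) hs' with ⟨hsort, heq⟩ | ⟨i, a, c, suf, hile, hiL, hd, hca, hsuf, heq⟩
      · exact Or.inl ⟨hsort, by rw [hstep, heq]⟩
      · exact Or.inr ⟨i, a, c, suf, by omega, hiL, hd, hca, hsuf, by rw [hstep, heq]⟩

-- what the body of A computes in the descent case
theorem body_eq (d : List Int) (i : Nat) (a c : Int) (suf : List Int)
    (hdrop : d.drop i = a :: c :: suf) (hca : c < a) :
    ∃ b, b ∈ (c :: suf).filter (fun y => decide (y < a)) ∧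
      (∀ y ∈ (c :: suf).filter (fun y => decide (y < a)), y ≤ b) ∧
      pvBodyA d (d.length - 1 - i) =
        (if PySem.List.pyGet? (rList (d.take i) a b c suf) 0 = some 0 then -1
         else dval (rList (d.take i) a b c suf)) := by
  have hlen : d.length - i = suf.length + 2 := by
    have := congrArg List.length hdrop
    simpa using this
  have hiL : i + 2 ≤ d.length := by omega
  have hcast : -(((d.length - 1 - i : Nat) : Int) + 1) = -(((d.length - 1 - i + 1 : Nat)) : Int) := by
    push_cast; ring
  simp only [pvBodyA]
  rw [hcast, PySem.List.slice_to_neg_natCast _ _ (by omega), PySem.List.slice_from_neg_natCast _ _ (by omega)]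
  have hti : d.length - (d.length - 1 - i + 1) = i := by omega
  rw [hti, hdrop, PySem.List.pyGet?_zero_cons]
  simp only [Option.elim_some]
  have hfil : (a :: c :: suf).filter (fun y => decide (y < a)) =
      (c :: suf).filter (fun y => decide (y < a)) := by
    simp
  rw [hfil]
  have hcfil : c ∈ (c :: suf).filter (fun y => decide (y < a)) :=
    List.mem_filter.mpr ⟨by simp, by simp [hca]⟩
  obtain ⟨b, hbeq⟩ : ∃ b, PySem.List.max? ((c :: suf).filter (fun y => decide (y < a)))
      (fun x => x) = some b := by
    cases hmx : PySem.List.max? ((c :: suf).filter (fun y => decide (y < a))) (fun x => x) with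
    | none =>
      rw [PySem.List.max?_eq_none_iff] at hmx
      rw [hmx] at hcfil
      simp at hcfil
    | some b => exact ⟨b, rfl⟩
  rw [hbeq]
  simp only [Option.elim_some]
  have hbmem := PySem.List.max?_mem hbeq
  have hbmax := PySem.List.max?_isMax hbeq
  have hba : b < a := by simpa using (List.mem_filter.mp hbmem).2
  have hbt2 : b ∈ a :: c :: suf := List.mem_cons_of_mem a (List.mem_filter.mp hbmem).1
  refine ⟨b, hbmem, hbmax, ?_⟩
  rw [PySem.List.index?_eq_idxOf?]
  cases hio : List.idxOf? b (a :: c :: suf) with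
  | none =>
    rw [List.idxOf?_eq_none_iff] at hio
    exact absurd hbt2 hio
  | some j =>
    simp only [Option.elim_some]
    obtain ⟨hjlen, hjval, _⟩ := List.idxOf?_eq_some_iff.mp hio
    have hjidx : j = (a :: c :: suf).idxOf b := by
      rw [List.idxOf_eq_getD_idxOf?, hio]
      rfl
    rw [PySem.List.pop?_natCast _ j hjlen]
    simp only [Option.elim_some]
    have herase : (a :: c :: suf).eraseIdx j = a :: (c :: suf).erase b := by
      rw [hjidx, List.eraseIdx_idxOf_eq_erase, List.erase_cons_tail (by simp; omega)]
    rw [hjval, herase]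
    have hfull : (d.take i ++ [b]) ++ PySem.List.sorted (a :: (c :: suf).erase b) (fun x => x) true
        = rList (d.take i) a b c suf := by
      simp [rList]
    rw [hfull]
    rfl

-- B's fold: characterization of the running maximum
def okP (n : Int) (p : List Int) : Prop :=
  ¬ (PySem.List.pyGet? p 0 = some 0 ∧ 1 < PySem.List.len p) ∧ dval p < n

def stepB (n : Int) (best : Int) (p : List Int) : Int :=
  if PySem.List.pyGet? p 0 = some 0 ∧ 1 < PySem.List.len p then best
  else
    let v := p.foldl (fun v d => v * 10 + d) 0
    if v < n ∧ best < v then v else best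

theorem stepB_le (n acc : Int) (p : List Int) : acc ≤ stepB n acc p := by
  unfold stepB
  split_ifs with h1
  · exact le_refl _
  · show acc ≤ if dval p < n ∧ acc < dval p then dval p else acc
    split_ifs with h2
    · exact le_of_lt h2.2
    · exact le_refl _

theorem foldB_le (n : Int) (l : List (List Int)) (acc : Int) :
    acc ≤ l.foldl (stepB n) acc := by
  induction l generalizing acc with
  | nil => simp
  | cons q t ih => exact le_trans (stepB_le n acc q) (ih (stepB n acc q))

theorem stepB_ok (n acc : Int) (p : List Int) (h : okP n p) : dval p ≤ stepB n acc p := by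
  obtain ⟨h1, h2⟩ := h
  unfold stepB
  rw [if_neg h1]
  show dval p ≤ if dval p < n ∧ acc < dval p then dval p else acc
  split_ifs with h3
  · exact le_refl _
  · rw [not_and] at h3; have := h3 h2; omega

theorem foldB_ge (n : Int) (l : List (List Int)) (acc : Int) :
    ∀ p ∈ l, okP n p → dval p ≤ l.foldl (stepB n) acc := by
  induction l generalizing acc with
  | nil => simp
  | cons q t ih =>
    intro p hp hok
    rcases List.mem_cons.mp hp with rfl | hp'
    · exact le_trans (stepB_ok n acc p hok) (foldB_le n t _)
    · exact ih (stepB n acc q) p hp' hok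

theorem foldB_cases (n : Int) (l : List (List Int)) (acc : Int) :
    l.foldl (stepB n) acc = acc ∨ ∃ p ∈ l, okP n p ∧ l.foldl (stepB n) acc = dval p := by
  induction l generalizing acc with
  | nil => left; rfl
  | cons q t ih =>
    rcases ih (stepB n acc q) with h1 | ⟨p, hp, hok, heq⟩
    · rw [List.foldl_cons, h1]
      by_cases h2 : (PySem.List.pyGet? q 0 = some 0 ∧ 1 < PySem.List.len q)
      · left; rw [stepB, if_pos h2]
      · by_cases h3 : (dval q < n ∧ acc < dval q)
        · right; refine ⟨q, by simp, ⟨h2, h3.1⟩, ?_⟩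
          rw [stepB, if_neg h2]
          show (if dval q < n ∧ acc < dval q then dval q else acc) = dval q
          exact if_pos h3
        · left; rw [stepB, if_neg h2]
          show (if dval q < n ∧ acc < dval q then dval q else acc) = acc
          exact if_neg h3
    · right; exact ⟨p, by simp [hp], hok, by rw [List.foldl_cons, heq]⟩

theorem pvConv_digitChar : ∀ k : Nat, k < 10 → pvConvA (Nat.digitChar k) = (k : Int) := by
  intro k hk
  interval_cases k <;> decide

theorem digits_nat : ∀ (m : Nat),
    AllDig ((Nat.toDigits 10 m).map pvConvA) ∧ ((Nat.toDigits 10 m).map pvConvA) ≠ [] ∧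
      dval ((Nat.toDigits 10 m).map pvConvA) = (m : Int) := by
  intro m
  induction m using Nat.strong_induction_on with
  | _ m ih =>
    rw [Nat.toDigits_eq_if (by norm_num)]
    split_ifs with h
    · have hc := pvConv_digitChar m h
      refine ⟨?_, by simp, ?_⟩
      · intro x hx
        simp [hc] at hx
        omega
      · simp [hc, dval]
    · have hdiv : m / 10 < m := Nat.div_lt_self (by omega) (by norm_num)
      obtain ⟨ih1, ih2, ih3⟩ := ih (m / 10) hdiv
      have hc := pvConv_digitChar (m % 10) (Nat.mod_lt _ (by norm_num))
      rw [List.map_append]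
      refine ⟨?_, by simp, ?_⟩
      · intro x hx
        rcases List.mem_append.mp hx with hx1 | hx1
        · exact ih1 x hx1
        · simp [hc] at hx1; omega
      · rw [show List.map pvConvA [(m % 10).digitChar] = [((m % 10 : Nat) : Int)] by simp [hc]]
        rw [dval_append_singleton, ih3]
        push_cast
        omega

theorem pairwise_short {l : List Int} (h : l.length ≤ 1) : l.Pairwise (· ≤ ·) := by
  match l, h with
  | [], _ => simp
  | [x], _ => simp

-- ===== VERDICT (by name: the statement is the Claim_ definition above) =====
theorem next_smaller_spec : Claim_equal_next_smaller := by
  intro n _ hpre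
  show pvLoopA (pvDigitsA n) 1 = next_smaller_alt n
  have hchars : PySem.Int.toChars n = Nat.toDigits 10 n.toNat := by
    simp [PySem.Int.toChars, not_lt.mpr hpre]
  obtain ⟨hdig0, hne0, hval0⟩ := digits_nat n.toNat
  have hdeq : pvDigitsA n = (Nat.toDigits 10 n.toNat).map pvConvA := by
    rw [pvDigitsA, hchars]
  set d := pvDigitsA n with hd
  have hdig : AllDig d := by rw [hdeq]; exact hdig0
  have hne : d ≠ [] := by rw [hdeq]; exact hne0
  have hval : dval d = n := by rw [hdeq, hval0, Int.toNat_of_nonneg hpre]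
  have hB : next_smaller_alt n = (PySem.List.permutations d d.length).foldl (stepB n) (-1) := rfl
  have hL1 : 1 ≤ d.length := by
    have := List.length_pos_of_ne_nil hne
    omega
  rcases loop_eq d 1 le_rfl hL1 (pairwise_short (by simp; omega)) with
    ⟨hsort, hA⟩ | ⟨i, a, c, suf, _, hiL, hdrop, hca, hsufs, hA⟩
  · -- the digits are nondecreasing: no smaller permutation exists, both sides give -1
    rw [hA, hB]
    rcases foldB_cases n (PySem.List.permutations d d.length) (-1) with h | ⟨p, hp, hok, heq⟩
    · exact h.symm
    · exfalso
      have hperm := PySem.List.perm_of_mem_permutations hp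
      have hpd : AllDig p := fun x hx => hdig x (hperm.subset hx)
      have hplex : lexLt p d := dval_lt_lex hpd hdig hperm.length_eq (by rw [hval]; exact hok.2)
      exact absurd hplex (lex_min d p hsort hperm)
  · -- descent case
    obtain ⟨b, hbmem, hbmax, hbody⟩ := body_eq d i a c suf hdrop hca
    rw [hA, hbody, hB]
    set pre := d.take i with hpre2
    have hdeq2 : d = pre ++ a :: c :: suf := by rw [hpre2, ← hdrop, List.take_append_drop]
    set r := rList pre a b c suf with hr
    have hba : b < a := by simpa using (List.mem_filter.mp hbmem).2
    have hrperm : r.Perm d := by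
      rw [hdeq2]; exact r_perm pre a b c suf hbmem
    have hrdig : AllDig r := fun x hx => hdig x (hrperm.subset hx)
    have hrlexd : lexLt r d := by
      rw [hdeq2]; exact r_lex pre a b c suf hba
    have hrval : dval r < n := by
      rw [← hval]; exact lex_dval_lt hrdig hdig hrperm.length_eq hrlexd
    have hr0 : 0 ≤ dval r := (dval_bounds hrdig).1
    have hmax := r_maximal pre a b c suf hsufs hca hbmem hbmax
    have hLlen : 2 ≤ d.length := by rw [hdeq2]; simp; omega
    by_cases hh : PySem.List.pyGet? r 0 = some 0
    · -- A returns -1 (leading zero); every smaller permutation also starts with 0, so B gives -1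
      rw [if_pos hh]
      rcases foldB_cases n (PySem.List.permutations d d.length) (-1) with h | ⟨p, hp, hok, heq⟩
      · exact h.symm
      · exfalso
        have hperm := PySem.List.perm_of_mem_permutations hp
        have hpd : AllDig p := fun x hx => hdig x (hperm.subset hx)
        have hplex : lexLt p d := dval_lt_lex hpd hdig hperm.length_eq (by rw [hval]; exact hok.2)
        have hpr : p = r ∨ lexLt p r := by
          rw [hdeq2] at hperm hplex
          exact hmax p hperm hplex
        apply hok.1
        have hplen : p.length = d.length := (PySem.List.perm_of_mem_permutations hp).length_eq
        have hrne : r ≠ [] := by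
          intro h0
          have hl0 := hrperm.length_eq
          rw [h0] at hl0
          simp at hl0
          omega
        obtain ⟨r0, rt, hre⟩ := List.exists_cons_of_ne_nil hrne
        rw [hre, PySem.List.pyGet?_zero_cons] at hh
        have hr00 : r0 = 0 := by injection hh
        constructor
        · cases p with
          | nil => rw [← hplen] at hLlen; simp at hLlen
          | cons h0 pt =>
            rw [PySem.List.pyGet?_zero_cons]
            have hge0 : 0 ≤ h0 := (hpd h0 (by simp)).1
            rcases hpr with h1 | h1
            · rw [hre] at h1
              rw [show h0 = r0 by injection h1, hr00]
            · rw [hre] at h1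
              simp only [lexLt] at h1
              rcases h1 with h1 | ⟨h1, _⟩
              · omega
              · rw [h1, hr00]
        · rw [PySem.List.len_eq]
          exact_mod_cast (by omega : 1 < (p.length : Int))
    · -- A returns the value of r, and r is the maximal candidate in B's enumeration
      rw [if_neg hh]
      have hrok : okP n r := ⟨fun hcon => hh hcon.1, hrval⟩
      have hrmem := mem_permutations_of_perm r d hrperm
      have hge := foldB_ge n (PySem.List.permutations d d.length) (-1) r hrmem hrok
      have hle : (PySem.List.permutations d d.length).foldl (stepB n) (-1) ≤ dval r := by
        rcases foldB_cases n (PySem.List.permutations d d.length) (-1) with h | ⟨p, hp, hok, heq⟩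
        · rw [h]; omega
        · rw [heq]
          have hperm := PySem.List.perm_of_mem_permutations hp
          have hpd : AllDig p := fun x hx => hdig x (hperm.subset hx)
          have hplex : lexLt p d := dval_lt_lex hpd hdig hperm.length_eq (by rw [hval]; exact hok.2)
          have hpr : p = r ∨ lexLt p r := by
            rw [hdeq2] at hperm hplex
            exact hmax p hperm hplex
          rcases hpr with h1 | h1
          · rw [h1]
          · exact le_of_lt (lex_dval_lt hpd hrdig
              (hperm.length_eq.trans hrperm.length_eq.symm) h1)
      exact le_antisymm hge hle
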